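-- pv_equiv track=rewrite | github.com/AnderCaporale/Trab-Final-CPD | funcao4.py | verifica_interseccao
-- ===== SOURCE A (Python) =====
-- def verifica_interseccao(matrizIDs):
--     vetorIntersec = []
--
--     for i in range(len(matrizIDs)):         #Percorre a matriz
--         for j in range(len(matrizIDs[i])):
--             idBusca = matrizIDs[i][j]       #Testa elemento a elemento da matriz
--             achou = 1               #Contador
--             for k in range(i+1, len(matrizIDs)):    #Compara o elemento com as outras linhas
--                 for l in range(len(matrizIDs[k])):  #Compara com cada elemento das outras linhas
--                     if idBusca == matrizIDs[k][l]:  #Se achou repetido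
--                         achou += 1                  #Incrementa contador
--                         break                       #Pula para comparar com a proxima linha
--                 if achou != k+1:                    #Se não encontrou em alguma linha, para a busca desse elemento
--                     break
--             #Se contador é igual ao numero de linhas, o numero ta em todas as linhas
--             if achou == len(matrizIDs):
--                 vetorIntersec.append(idBusca)       #Salva o id igual em todas as linhas
--
--     return vetorIntersec
-- ===== SOURCE B (Python) =====
-- def verifica_interseccao(matrizIDs):
--     if not matrizIDs:
--         return []
--     common = set(matrizIDs[0])
--     for row in matrizIDs[1:]:
--         common &= set(row)
--     return [x for x in matrizIDs[0] if x in common]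
-- ===== Notes on version B (the rewrite author's own statement) =====
-- stated objective: faster
-- what changed: Replaces A's per-element nested scan over all later rows (with counter/early-break logic) by folding all rows into one intersection set once and then filtering row 0 in a single pass.
import Mathlib
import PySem

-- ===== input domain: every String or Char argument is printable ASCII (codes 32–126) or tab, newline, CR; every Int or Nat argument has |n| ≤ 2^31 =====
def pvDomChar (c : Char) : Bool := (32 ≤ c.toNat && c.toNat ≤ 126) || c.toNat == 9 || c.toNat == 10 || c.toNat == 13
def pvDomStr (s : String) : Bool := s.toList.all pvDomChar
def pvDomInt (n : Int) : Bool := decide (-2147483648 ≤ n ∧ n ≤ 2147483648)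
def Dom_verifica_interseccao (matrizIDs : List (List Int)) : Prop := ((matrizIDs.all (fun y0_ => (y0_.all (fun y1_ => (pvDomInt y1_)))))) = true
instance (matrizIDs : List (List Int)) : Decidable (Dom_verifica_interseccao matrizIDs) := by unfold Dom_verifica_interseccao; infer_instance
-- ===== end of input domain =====

-- B builds one intersection set of all rows and filters row 0 once, instead of A's nested scan of every later row per element.

-- ===== PORT A =====
-- inner 'for l' loop: scans row, returns true at the first match (the break)
def aFindRow (idBusca : Int) (row : List Int) : Bool :=
  match row with
  | [] => false
  | x :: xs => if idBusca == x then true else aFindRow idBusca xs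

-- 'for k in range(i+1, len(matrizIDs))' loop carrying achou; k is the python index
def aKLoop (idBusca : Int) (rows : List (List Int)) (achou k : Int) : Int :=
  match rows with
  | [] => achou
  | r :: rs =>
    let achou' := if aFindRow idBusca r then achou + 1 else achou
    if achou' ≠ k + 1 then achou' else aKLoop idBusca rs achou' (k + 1)

-- 'for j' loop over row i, appending when achou == len(matrizIDs)
def aJLoop (n i : Int) (rest : List (List Int)) (row : List Int) (acc : List Int) : List Int :=
  match row with
  | [] => acc
  | idBusca :: js =>
    let achou := aKLoop idBusca rest 1 (i + 1)
    aJLoop n i rest js (if achou == n then acc ++ [idBusca] else acc)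

-- outer 'for i' loop; rest = rows after index i
def aILoop (n i : Int) (rows : List (List Int)) (acc : List Int) : List Int :=
  match rows with
  | [] => acc
  | row :: rest => aILoop n (i + 1) rest (aJLoop n i rest row acc)

def verifica_interseccao (matrizIDs : List (List Int)) : List Int :=
  aILoop (matrizIDs.length : Int) 0 matrizIDs []

-- ===== PORT B =====
def verifica_interseccao_alt (matrizIDs : List (List Int)) : List Int :=
  match matrizIDs with
  | [] => []
  | r0 :: rest =>
    let common : PySem.Set Int :=
      rest.foldl (fun c row => PySem.Set.inter c (PySem.Set.ofList row)) (PySem.Set.ofList r0)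
    r0.filter (fun x => PySem.Set.contains common x)

-- ===== PRECONDITION & SPEC =====
def Spec_verifica_interseccao (matrizIDs : List (List Int)) (out : List Int) : Prop := out = verifica_interseccao_alt matrizIDs
instance (matrizIDs : List (List Int)) (out : List Int) : Decidable (Spec_verifica_interseccao matrizIDs out) := by unfold Spec_verifica_interseccao; infer_instance

-- ===== CLAIM (what is proved, stated in full; the proofs are below) =====
def Claim_equal_verifica_interseccao : Prop := ∀ (matrizIDs : List (List Int)), Dom_verifica_interseccao matrizIDs → Spec_verifica_interseccao matrizIDs (verifica_interseccao matrizIDs)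

-- ===== LEMMAS AND PROOFS =====

theorem aFindRow_iff (x : Int) (r : List Int) : aFindRow x r = true ↔ x ∈ r := by
  induction r with
  | nil => simp [aFindRow]
  | cons y ys ih => by_cases h : x = y <;> simp [aFindRow, h, ih]

theorem aKLoop_eq_iff (x : Int) (rs : List (List Int)) :
    ∀ k : Int, aKLoop x rs k k = k + rs.length ↔ ∀ r ∈ rs, x ∈ r := by
  induction rs with
  | nil => intro k; simp [aKLoop]
  | cons r rs ih =>
    intro k
    by_cases h : aFindRow x r = true
    · have hx : x ∈ r := (aFindRow_iff x r).1 h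
      simp only [aKLoop, h, if_true, if_neg (by simp : ¬ (k + 1 ≠ k + 1))]
      rw [show (k + ((r :: rs).length : Int)) = (k + 1) + rs.length by simp; omega]
      rw [ih (k + 1)]
      simp [hx]
    · have hx : x ∉ r := fun hm => h ((aFindRow_iff x r).2 hm)
      simp only [aKLoop]
      rw [if_neg h, if_pos (by omega : k ≠ k + 1)]
      simp only [List.length_cons]
      constructor
      · intro h'; exfalso; push_cast at h'; omega
      · intro h'; exact absurd (h' r (by simp)) hx

-- achou stays ≤ 2 when the loop starts at k ≥ 2 (every row after the first breaks)
theorem aKLoop_small (x : Int) (rs : List (List Int)) (k : Int) (hk : 2 ≤ k) :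
    aKLoop x rs 1 k ≤ 2 := by
  cases rs with
  | nil => simp [aKLoop]
  | cons r rs =>
    by_cases h : aFindRow x r = true
    · simp only [aKLoop, h, if_true]
      rw [if_pos (by omega : (1 : Int) + 1 ≠ k + 1)]
      omega
    · simp only [aKLoop]
      rw [if_neg h, if_pos (by omega : (1 : Int) ≠ k + 1)]
      omega

-- for i ≥ 1 the j-loop appends nothing
theorem aJLoop_noadd (n i : Int) (rest : List (List Int)) (row acc : List Int)
    (hi : 1 ≤ i) (hn : n = i + 1 + rest.length) :
    aJLoop n i rest row acc = acc := by
  induction row with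
  | nil => simp [aJLoop]
  | cons x js ih =>
    have hne : ¬ (aKLoop x rest 1 (i + 1) == n) = true := by
      cases rest with
      | nil => simp only [aKLoop]; simp only [List.length_nil] at hn; simp; omega
      | cons r rs =>
        have := aKLoop_small x (r :: rs) (i + 1) (by omega)
        simp only [List.length_cons] at hn
        simp only [beq_iff_eq]
        intro h; push_cast at hn; omega
    simp only [aJLoop, Bool.not_eq_true] at hne ⊢
    rw [hne]
    exact ih

theorem aILoop_later (rows : List (List Int)) :
    ∀ (n i : Int) (acc : List Int), 1 ≤ i → n = i + rows.length → aILoop n i rows acc = acc := by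
  induction rows with
  | nil => intro n i acc _ _; simp [aILoop]
  | cons row rest ih =>
    intro n i acc hi hn
    simp only [List.length_cons] at hn
    simp only [aILoop]
    rw [aJLoop_noadd n i rest row acc hi (by push_cast at hn ⊢; omega)]
    exact ih n (i + 1) acc (by omega) (by push_cast at hn ⊢; omega)

theorem aJLoop_filter (n : Int) (rest : List (List Int)) (row : List Int) :
    ∀ acc : List Int,
    aJLoop n 0 rest row acc = acc ++ row.filter (fun x => aKLoop x rest 1 1 == n) := by
  induction row with
  | nil => intro acc; simp [aJLoop]
  | cons x js ih =>
    intro acc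
    simp only [aJLoop]
    by_cases h : (aKLoop x rest 1 (0 + 1) == n) = true
    · rw [if_pos h, ih]
      rw [show (0 : Int) + 1 = 1 by omega] at h
      simp [h]
    · rw [if_neg h, ih]
      rw [show (0 : Int) + 1 = 1 by omega] at h
      simp [h]

theorem mem_common (rest : List (List Int)) :
    ∀ (s : PySem.Set Int) (x : Int),
    x ∈ rest.foldl (fun c row => PySem.Set.inter c (PySem.Set.ofList row)) s ↔
      x ∈ s ∧ ∀ r ∈ rest, x ∈ r := by
  induction rest with
  | nil => intro s x; simp
  | cons r rs ih =>
    intro s x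
    simp only [List.foldl_cons, ih, PySem.Set.mem_inter, PySem.Set.mem_ofList,
      List.mem_cons]
    constructor
    · rintro ⟨⟨hs, hr⟩, hrs⟩
      exact ⟨hs, fun q hq => by rcases hq with rfl | hq; exact hr; exact hrs q hq⟩
    · rintro ⟨hs, hall⟩
      exact ⟨⟨hs, hall r (Or.inl rfl)⟩, fun q hq => hall q (Or.inr hq)⟩

-- ===== VERDICT (by name: the statement is the Claim_ definition above) =====
theorem verifica_interseccao_spec : Claim_equal_verifica_interseccao := by
  intro m _
  unfold Spec_verifica_interseccao verifica_interseccao verifica_interseccao_alt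
  cases m with
  | nil => simp [aILoop]
  | cons r0 rest =>
    simp only [aILoop, zero_add]
    rw [aILoop_later rest ((r0 :: rest).length : Int) 1 _ (by omega)
        (by simp; omega)]
    rw [aJLoop_filter]
    simp only [List.nil_append]
    apply List.filter_congr
    intro x hx
    have hiff : (aKLoop x rest 1 1 = ((r0 :: rest).length : Int)) ↔ ∀ r ∈ rest, x ∈ r := by
      rw [show ((r0 :: rest).length : Int) = 1 + rest.length by simp; omega]
      exact aKLoop_eq_iff x rest 1
    have hc : (PySem.Set.contains
        (rest.foldl (fun c row => PySem.Set.inter c (PySem.Set.ofList row)) (PySem.Set.ofList r0)) x) = true ↔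
        ∀ r ∈ rest, x ∈ r := by
      rw [PySem.Set.contains_iff, mem_common, PySem.Set.mem_ofList]
      exact ⟨fun h => h.2, fun h => ⟨hx, h⟩⟩
    rw [Bool.eq_iff_iff]
    simp only [beq_iff_eq]
    rw [hiff, hc]
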